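-- pv_equiv track=rewrite | github.com/aidanq06/Trackify | fbla project/aidan's/test2/main.py | assign_prize
-- ===== SOURCE A (Python) =====
-- def assign_prize(points):
--         # Prizes: each tuple represents (points threshold, prize)
--         prizes = [
--             (0, "Free snack from school store"),
--             (93, 'Free homework pass'),
--             (95, 'Free entry to next school-related event'),
--             (97, 'Choice of any school-spirited apparel (hoodie, shirt, etc.)'),
--         ]
--         # Assign the highest prize the student's points qualify for
--         for threshold, prize in reversed(prizes):
--             if points >= threshold:
--                 return prize
-- ===== SOURCE B (Python) =====
-- import bisect
--
-- _THRESHOLDS = [0, 93, 95, 97]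
-- _PRIZES = [
--     "Free snack from school store",
--     'Free homework pass',
--     'Free entry to next school-related event',
--     'Choice of any school-spirited apparel (hoodie, shirt, etc.)',
-- ]
--
-- def assign_prize(points):
--     i = bisect.bisect_right(_THRESHOLDS, points) - 1
--     return _PRIZES[i] if i >= 0 else None
-- ===== Notes on version B (the rewrite author's own statement) =====
-- stated objective: idiomatic
-- what changed: Replaces the reverse linear scan over (threshold, prize) tuples with a bisect_right binary search into a sorted threshold table parallel to the prize strings.
import Mathlib
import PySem

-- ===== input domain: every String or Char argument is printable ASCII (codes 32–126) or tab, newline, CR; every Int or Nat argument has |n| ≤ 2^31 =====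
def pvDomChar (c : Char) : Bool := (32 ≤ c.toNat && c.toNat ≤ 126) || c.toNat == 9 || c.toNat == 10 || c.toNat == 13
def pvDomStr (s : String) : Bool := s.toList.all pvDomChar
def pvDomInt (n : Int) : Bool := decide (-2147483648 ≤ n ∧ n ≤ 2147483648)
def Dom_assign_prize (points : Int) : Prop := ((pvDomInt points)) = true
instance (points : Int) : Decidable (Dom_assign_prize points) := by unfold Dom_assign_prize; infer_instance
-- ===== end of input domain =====

-- B replaces A's reverse linear scan with a bisect_right index into a sorted threshold table (idiomatic; same values).
-- ===== PORT A =====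
-- reversed(prizes) scanned in order: first threshold with points >= threshold wins
def assignPrizeLoop (points : Int) : List (Int × String) → Option String
  | [] => none
  | (t, prize) :: rest => if points ≥ t then some prize else assignPrizeLoop points rest

def assign_prize (points : Int) : Option String :=
  let prizes : List (Int × String) := [
    (0, "Free snack from school store"),
    (93, "Free homework pass"),
    (95, "Free entry to next school-related event"),
    (97, "Choice of any school-spirited apparel (hoodie, shirt, etc.)")]
  assignPrizeLoop points prizes.reverse

-- ===== PORT B =====
-- bisect.bisect_right on a sorted list = number of elements ≤ points (ported as countP)
def bThresholds : List Int := [0, 93, 95, 97]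
def bPrizes : List String := [
  "Free snack from school store",
  "Free homework pass",
  "Free entry to next school-related event",
  "Choice of any school-spirited apparel (hoodie, shirt, etc.)"]

def assign_prize_alt (points : Int) : Option String :=
  let i : Int := (bThresholds.countP (fun t => decide (t ≤ points)) : Int) - 1
  if i ≥ 0 then bPrizes[i.toNat]? else none

-- ===== PRECONDITION & SPEC =====
def Spec_assign_prize (points : Int) (out : Option String) : Prop := out = assign_prize_alt points
instance (points : Int) (out : Option String) : Decidable (Spec_assign_prize points out) := by unfold Spec_assign_prize; infer_instance

-- ===== CLAIM (what is proved, stated in full; the proofs are below) =====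
def Claim_equal_assign_prize : Prop := ∀ (points : Int), Dom_assign_prize points → Spec_assign_prize points (assign_prize points)

-- ===== LEMMAS AND PROOFS =====

-- ===== VERDICT (by name: the statement is the Claim_ definition above) =====
theorem assign_prize_spec : Claim_equal_assign_prize := by
  intro points _
  unfold Spec_assign_prize assign_prize assign_prize_alt bThresholds bPrizes
  by_cases h97 : (97 : Int) ≤ points <;> by_cases h95 : (95 : Int) ≤ points <;>
    by_cases h93 : (93 : Int) ≤ points <;> by_cases h0 : (0 : Int) ≤ points <;>
    simp [assignPrizeLoop, List.countP, List.countP.go, h97, h95, h93, h0, ge_iff_le] <;> omega
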